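-- pv_equiv track=rewrite | github.com/CoastalDigitalResearch/TopoLI | topoli/data/passage_extractor.py | _overlap_start
-- ===== SOURCE A (Python) =====
-- def _overlap_start(items: list[str], overlap_chars: int) -> int:
--     """Find the start index to keep overlap_chars worth of trailing items."""
--     collected = 0
--     start = len(items)
--     for i in range(len(items) - 1, -1, -1):
--         collected += len(items[i])
--         start = i
--         if collected >= overlap_chars:
--             break
--     return start
-- ===== SOURCE B (Python) =====
-- def _overlap_start(items: list[str], overlap_chars: int) -> int:
--     """Find the start index to keep overlap_chars worth of trailing items."""
--     total = sum(len(s) for s in items)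
--     prefix = 0
--     ans = 0
--     for start in range(len(items)):
--         if total - prefix >= overlap_chars:
--             ans = start
--         prefix += len(items[start])
--     return ans
-- ===== Notes on version B (the rewrite author's own statement) =====
-- stated objective: alternative
-- what changed: B replaces A's backward scan with early break by a precomputed total length plus a single forward pass maintaining a prefix sum, recording the last index whose suffix length reaches the overlap.
import Mathlib
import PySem

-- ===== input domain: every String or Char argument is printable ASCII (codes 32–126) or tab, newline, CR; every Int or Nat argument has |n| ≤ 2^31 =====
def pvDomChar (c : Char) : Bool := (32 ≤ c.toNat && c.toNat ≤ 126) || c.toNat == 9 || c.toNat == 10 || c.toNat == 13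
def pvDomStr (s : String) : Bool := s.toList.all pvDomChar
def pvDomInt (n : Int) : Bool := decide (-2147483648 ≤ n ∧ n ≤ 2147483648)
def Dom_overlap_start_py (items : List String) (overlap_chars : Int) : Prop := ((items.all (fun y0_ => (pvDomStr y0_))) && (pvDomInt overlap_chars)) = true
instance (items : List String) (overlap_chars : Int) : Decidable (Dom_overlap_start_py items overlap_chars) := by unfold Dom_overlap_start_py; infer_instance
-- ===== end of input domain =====

-- B replaces A's backward scan-with-break by a precomputed total length plus one forward prefix-sum pass recording the last qualifying index (objective: alternative decomposition, same cost).


-- ===== PORT A =====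
-- literal port of A: walk i = len-1 … 0, accumulate collected, break when collected >= overlap_chars
def overlapALoop (items : List String) (oc : Int) : List Int → Int → Int → Int
  | [], _, start => start
  | i :: rest, collected, _ =>
    let collected := collected + PySem.Str.len (PySem.List.pyGetD items i "")
    let start := i
    if oc ≤ collected then start else overlapALoop items oc rest collected start

def overlap_start_py (items : List String) (overlap_chars : Int) : Int :=
  overlapALoop items overlap_chars
    (PySem.List.pyRange (PySem.List.len items - 1) (-1) (-1)) 0 (PySem.List.len items)

-- ===== PORT B =====
-- port of B: total = sum of lengths, forward fold over (prefix, ans)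
def overlap_start_py_alt (items : List String) (overlap_chars : Int) : Int :=
  let total := items.foldl (fun acc s => acc + PySem.Str.len s) 0
  let r := (PySem.List.pyRange 0 (PySem.List.len items) 1).foldl
    (fun (st : Int × Int) i =>
      let ans := if overlap_chars ≤ total - st.1 then i else st.2
      (st.1 + PySem.Str.len (PySem.List.pyGetD items i ""), ans))
    (0, 0)
  r.2

-- ===== PRECONDITION & SPEC =====
def Spec_overlap_start_py (items : List String) (overlap_chars : Int) (out : Int) : Prop := out = overlap_start_py_alt items overlap_chars
instance (items : List String) (overlap_chars : Int) (out : Int) : Decidable (Spec_overlap_start_py items overlap_chars out) := by unfold Spec_overlap_start_py; infer_instance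

-- ===== CLAIM (what is proved, stated in full; the proofs are below) =====
def Claim_equal_overlap_start_py : Prop := ∀ (items : List String) (overlap_chars : Int), Dom_overlap_start_py items overlap_chars → Spec_overlap_start_py items overlap_chars (overlap_start_py items overlap_chars)

-- ===== LEMMAS AND PROOFS =====

-- sum of string lengths, as B's first fold computes it
def sumLen (l : List String) : Int := l.foldl (fun acc s => acc + PySem.Str.len s) 0

-- greatest index i of l whose suffix length sum is ≥ oc (none if no index qualifies)
def gIdx (oc : Int) : List String → Option Nat
  | [] => none
  | x :: xs =>
    match gIdx oc xs with
    | some j => some (j + 1)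
    | none => if oc ≤ PySem.Str.len x + sumLen xs then some 0 else none

theorem sumLen_shift (l : List String) (c : Int) :
    l.foldl (fun acc s => acc + PySem.Str.len s) c = c + sumLen l := by
  induction l generalizing c with
  | nil => simp [sumLen]
  | cons x xs ih =>
    rw [sumLen, List.foldl_cons, List.foldl_cons, ih, ih]
    ring

theorem sumLen_append (l₁ l₂ : List String) :
    sumLen (l₁ ++ l₂) = sumLen l₁ + sumLen l₂ := by
  rw [sumLen, List.foldl_append, sumLen_shift]
  rfl

theorem sumLen_cons (x : String) (l : List String) :
    sumLen (x :: l) = PySem.Str.len x + sumLen l := by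
  rw [sumLen, List.foldl_cons, sumLen_shift]
  show 0 + PySem.Str.len x + sumLen l = _
  ring

theorem gIdx_append_singleton (l : List String) (y : String) (oc : Int) :
    gIdx oc (l ++ [y]) =
      if oc ≤ PySem.Str.len y then some l.length else gIdx (oc - PySem.Str.len y) l := by
  induction l with
  | nil =>
    rw [List.nil_append]
    show (match (none : Option Nat) with
          | some j => some (j + 1)
          | none => if oc ≤ PySem.Str.len y + sumLen [] then some 0 else none) = _
    have h0 : PySem.Str.len y + sumLen [] = PySem.Str.len y := by
      rw [sumLen]; simp
    rw [h0]
    by_cases h : oc ≤ PySem.Str.len y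
    · rw [if_pos h, if_pos h]; rfl
    · rw [if_neg h, if_neg h]; rfl
  | cons x xs ih =>
    rw [List.cons_append]
    show (match gIdx oc (xs ++ [y]) with
          | some j => some (j + 1)
          | none => if oc ≤ PySem.Str.len x + sumLen (xs ++ [y]) then some 0 else none) = _
    have hsy : sumLen [y] = PySem.Str.len y := by
      rw [sumLen]; simp
    rw [ih, sumLen_append, hsy]
    by_cases h : oc ≤ PySem.Str.len y
    · rw [if_pos h, if_pos h]; rfl
    · rw [if_neg h, if_neg h]
      show _ = (match gIdx (oc - PySem.Str.len y) xs with
                | some j => some (j + 1)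
                | none => if oc - PySem.Str.len y ≤ PySem.Str.len x + sumLen xs then some 0 else none)
      cases hx : gIdx (oc - PySem.Str.len y) xs with
      | some j => rfl
      | none =>
        by_cases h2 : oc - PySem.Str.len y ≤ PySem.Str.len x + sumLen xs
        · rw [if_pos (by omega), if_pos h2]
        · rw [if_neg (by omega), if_neg h2]

theorem take_succ_getElem (items : List String) (k : Nat) (hk : k < items.length) :
    items.take (k + 1) = items.take k ++ [items[k]] := by
  rw [List.take_add_one]
  simp [List.getElem?_eq_getElem hk]

theorem pyGetD_at (items : List String) (k : Nat) (hk : k < items.length) :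
    PySem.List.pyGetD items ((k : Int)) "" = items[k] := by
  rw [PySem.List.pyGetD_natCast]
  exact List.getD_eq_getElem items "" hk

-- A's loop over range(k-1, -1, -1) computes gIdx on the first k items
theorem overlapALoop_char (items : List String) (oc : Int) (k : Nat) (hk : k ≤ items.length)
    (c s : Int) :
    overlapALoop items oc (PySem.List.pyRange ((k : Int) - 1) (-1) (-1)) c s =
      (match gIdx (oc - c) (items.take k) with
       | some j => (j : Int)
       | none => if k = 0 then s else 0) := by
  induction k generalizing c s with
  | zero =>
    rw [PySem.List.pyRange_neg_one_eq_nil (by norm_num)]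
    simp [overlapALoop, gIdx]
  | succ k ih =>
    have hk' : k < items.length := by omega
    have hcons : PySem.List.pyRange (((k + 1 : Nat) : Int) - 1) (-1) (-1)
        = (k : Int) :: PySem.List.pyRange ((k : Int) - 1) (-1) (-1) := by
      have h1 : ((k + 1 : Nat) : Int) - 1 = (k : Int) := by push_cast; ring
      rw [h1, PySem.List.pyRange_neg_one_cons (by omega)]
    rw [hcons]
    show (if oc ≤ c + PySem.Str.len (PySem.List.pyGetD items ((k : Int)) "") then (k : Int)
          else overlapALoop items oc (PySem.List.pyRange ((k : Int) - 1) (-1) (-1))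
                 (c + PySem.Str.len (PySem.List.pyGetD items ((k : Int)) "")) (k : Int)) = _
    rw [pyGetD_at items k hk', take_succ_getElem items k hk',
        gIdx_append_singleton (items.take k) items[k] (oc - c)]
    have hlen : (items.take k).length = k := by
      simp [List.length_take, Nat.min_eq_left (le_of_lt hk')]
    by_cases hbr : oc ≤ c + PySem.Str.len items[k]
    · rw [if_pos hbr, if_pos (by omega), hlen]
    · rw [if_neg hbr, if_neg (show ¬ oc - c ≤ PySem.Str.len items[k] by omega)]
      rw [ih hk'.le (c + PySem.Str.len items[k]) (k : Int)]
      have h3 : oc - c - PySem.Str.len items[k] = oc - (c + PySem.Str.len items[k]) := by ring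
      rw [h3]
      cases gIdx (oc - (c + PySem.Str.len items[k])) (items.take k) with
      | some j => rfl
      | none =>
        by_cases hk0 : k = 0
        · subst hk0; simp
        · simp [hk0]

-- B's fold over range(0, k, 1) reaches state (prefix, ans) = (sumLen (take k), best index so far)
theorem overlapBLoop_char (items : List String) (oc : Int) (k : Nat) (hk : k ≤ items.length) :
    ((PySem.List.pyRange 0 (k : Int) 1).foldl
      (fun (st : Int × Int) i =>
        let ans := if oc ≤ sumLen items - st.1 then i else st.2
        (st.1 + PySem.Str.len (PySem.List.pyGetD items i ""), ans))
      (0, 0)) =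
      (sumLen (items.take k),
       (match gIdx (oc - sumLen (items.drop k)) (items.take k) with
        | some j => (j : Int)
        | none => 0)) := by
  induction k with
  | zero =>
    rw [PySem.List.pyRange_one_eq_nil (by norm_num)]
    simp [gIdx, sumLen]
  | succ k ih =>
    have hk' : k < items.length := by omega
    have hsplit : PySem.List.pyRange 0 ((k + 1 : Nat) : Int) 1
        = PySem.List.pyRange 0 (k : Int) 1 ++ [(k : Int)] := by
      have h1 : ((k + 1 : Nat) : Int) = (k : Int) + 1 := by push_cast; ring
      rw [h1, PySem.List.pyRange_one_succ_right (by positivity)]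
    rw [hsplit, List.foldl_append, ih hk'.le]
    have hdrop : items.drop k = items[k] :: items.drop (k + 1) := by
      rw [List.drop_eq_getElem_cons hk']
    have htake : items.take (k + 1) = items.take k ++ [items[k]] := take_succ_getElem items k hk'
    have hsumdrop : sumLen (items.drop k) = PySem.Str.len items[k] + sumLen (items.drop (k + 1)) := by
      rw [hdrop, sumLen_cons]
    have hsy : sumLen [items[k]] = PySem.Str.len items[k] := by
      rw [sumLen]; simp
    have hsumtake : sumLen (items.take (k + 1)) = sumLen (items.take k) + PySem.Str.len items[k] := by
      rw [htake, sumLen_append, hsy]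
    have htotal : sumLen items = sumLen (items.take k) + sumLen (items.drop k) := by
      conv_lhs => rw [← List.take_append_drop k items]
      exact sumLen_append _ _
    have hlen : (items.take k).length = k := by
      simp [List.length_take, Nat.min_eq_left (le_of_lt hk')]
    rw [List.foldl_cons, List.foldl_nil]
    show ((sumLen (items.take k) + PySem.Str.len (PySem.List.pyGetD items ((k : Int)) ""),
          if oc ≤ sumLen items - sumLen (items.take k) then (k : Int)
          else (match gIdx (oc - sumLen (items.drop k)) (items.take k) with
                | some j => (j : Int)
                | none => 0)) : Int × Int) = _
    rw [pyGetD_at items k hk', htake,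
        gIdx_append_singleton (items.take k) items[k] (oc - sumLen (items.drop (k + 1)))]
    have hcond : (oc ≤ sumLen items - sumLen (items.take k))
        ↔ (oc - sumLen (items.drop (k + 1)) ≤ PySem.Str.len items[k]) := by omega
    refine Prod.ext ?_ ?_
    · show sumLen (items.take k) + PySem.Str.len items[k] = sumLen (items.take k ++ [items[k]])
      rw [sumLen_append, hsy]
    · show (if oc ≤ sumLen items - sumLen (items.take k) then (k : Int)
            else (match gIdx (oc - sumLen (items.drop k)) (items.take k) with
                  | some j => (j : Int)
                  | none => 0)) = _
      by_cases hb : oc ≤ sumLen items - sumLen (items.take k)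
      · rw [if_pos hb, if_pos (hcond.mp hb), hlen]
      · rw [if_neg hb, if_neg (fun h => hb (hcond.mpr h))]
        have h4 : oc - sumLen (items.drop (k + 1)) - PySem.Str.len items[k]
            = oc - sumLen (items.drop k) := by omega
        rw [h4]

-- ===== VERDICT (by name: the statement is the Claim_ definition above) =====
theorem overlap_start_py_spec : Claim_equal_overlap_start_py := by
  intro items oc _
  show overlap_start_py items oc = overlap_start_py_alt items oc
  rw [overlap_start_py, overlap_start_py_alt]
  rw [show items.foldl (fun acc s => acc + PySem.Str.len s) 0 = sumLen items from rfl]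
  rw [show PySem.List.len items = ((items.length : Nat) : Int) from PySem.List.len_eq items]
  rw [overlapALoop_char items oc items.length le_rfl 0 (items.length : Int),
      overlapBLoop_char items oc items.length le_rfl]
  rw [List.take_length, List.drop_length]
  rw [show sumLen [] = 0 from rfl]
  have h0 : oc - 0 = oc := by ring
  rw [h0]
  cases gIdx oc items with
  | some j => rfl
  | none =>
    by_cases h : items.length = 0
    · simp [h]
    · simp [h]
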